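-- pv_equiv track=rewrite | github.com/sxmeng2017/t_2048 | x2048.py | is_left_movable
-- ===== SOURCE A (Python) =====
-- def is_left_movable(row):
--     def change(i):
--         if row[i] == 0 and row[i+1] != 0:
--             return True
--         if row[i] !=0 and row[i+1] == row[i]:
--             return True
--         return False
--     return any(change(i) for i in range(len(row) - 1))
-- ===== SOURCE B (Python) =====
-- def is_left_movable(row):
--     tiles = [x for x in row if x != 0]
--     merged = []
--     i = 0
--     while i < len(tiles):
--         if i + 1 < len(tiles) and tiles[i] == tiles[i + 1]:
--             merged.append(tiles[i] * 2)
--             i += 2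
--         else:
--             merged.append(tiles[i])
--             i += 1
--     merged.extend([0] * (len(row) - len(merged)))
--     return merged != row
-- ===== Notes on version B (the rewrite author's own statement) =====
-- stated objective: alternative
-- what changed: B simulates the actual left move (compact nonzero tiles, merge adjacent equal pairs, pad with zeros) and reports whether the slid row differs from the original, instead of A's scan for a local movable adjacent pair.
import Mathlib
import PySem

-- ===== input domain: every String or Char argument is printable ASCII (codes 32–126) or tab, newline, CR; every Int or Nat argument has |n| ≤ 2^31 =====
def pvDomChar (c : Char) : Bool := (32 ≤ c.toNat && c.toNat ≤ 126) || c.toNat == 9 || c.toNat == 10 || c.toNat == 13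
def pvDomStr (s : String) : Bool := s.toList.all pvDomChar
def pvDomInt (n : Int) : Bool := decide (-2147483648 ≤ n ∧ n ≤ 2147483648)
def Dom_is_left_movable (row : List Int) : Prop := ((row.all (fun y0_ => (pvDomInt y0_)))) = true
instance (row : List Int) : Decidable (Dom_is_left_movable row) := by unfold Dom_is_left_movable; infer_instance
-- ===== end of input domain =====

-- B simulates the actual 2048 left move (compact, merge, pad) and compares with the original row; A scans for a local movable pair. Alternative decomposition, same cost.

-- ===== PORT A =====
-- inner 'def change(i)' of A (closure over row); row[i] is always in range for the indices A uses
def changeA (row : List Int) (i : Int) : Bool :=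
  if (PySem.List.pyGet? row i).getD 0 == 0 && (PySem.List.pyGet? row (i + 1)).getD 0 != 0 then true
  else if (PySem.List.pyGet? row i).getD 0 != 0 && (PySem.List.pyGet? row (i + 1)).getD 0 == (PySem.List.pyGet? row i).getD 0 then true
  else false

def is_left_movable (row : List Int) : Bool :=
  (PySem.List.pyRange 0 ((row.length : Int) - 1) 1).any (fun i => changeA row i)

-- ===== PORT B =====
-- the while loop of B: consume the compacted tiles, merging one adjacent equal pair at a time
def mergeRec : List Int → List Int
  | a :: b :: t => if a == b then a * 2 :: mergeRec t else a :: mergeRec (b :: t)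
  | l => l

def is_left_movable_alt (row : List Int) : Bool :=
  let tiles := row.filter (fun x => x != 0)
  let merged := mergeRec tiles
  let res := merged ++ List.replicate (row.length - merged.length) 0
  res != row

-- ===== PRECONDITION & SPEC =====
def Spec_is_left_movable (row : List Int) (out : Bool) : Prop := out = is_left_movable_alt row
instance (row : List Int) (out : Bool) : Decidable (Spec_is_left_movable row out) := by unfold Spec_is_left_movable; infer_instance

-- ===== CLAIM (what is proved, stated in full; the proofs are below) =====
def Claim_equal_is_left_movable : Prop := ∀ (row : List Int), Dom_is_left_movable row → Spec_is_left_movable row (is_left_movable row)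

-- ===== LEMMAS AND PROOFS =====

-- simple recursive characterisation of A's scan
def movP : List Int → Bool
  | a :: b :: t => ((a == 0 && b != 0) || (a != 0 && b == a)) || movP (b :: t)
  | _ => false

theorem any_congr_mem {α : Type} (l : List α) (f g : α → Bool)
    (h : ∀ x ∈ l, f x = g x) : l.any f = l.any g := by
  induction l with
  | nil => rfl
  | cons a t ih =>
      simp only [List.any_cons, h a (by simp)]
      rw [ih (fun x hx => h x (by simp [hx]))]

theorem changeA_cons (x : Int) (xs : List Int) (n : Nat) :
    changeA (x :: xs) ((n : Int) + 1) = changeA xs n := by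
  have h1 : PySem.List.pyGet? (x :: xs) ((n : Int) + 1) = PySem.List.pyGet? xs n :=
    PySem.List.pyGet?_cons_succ x xs n
  have h2 : PySem.List.pyGet? (x :: xs) ((n : Int) + 1 + 1) = PySem.List.pyGet? xs ((n : Int) + 1) := by
    have := PySem.List.pyGet?_cons_succ x xs (n + 1)
    push_cast at this
    simpa using this
  simp [changeA, h1, h2]

theorem A_unfold (row : List Int) :
    is_left_movable row = (List.range (row.length - 1)).any (fun k => changeA row (k : Int)) := by
  unfold is_left_movable
  cases row with
  | nil => simp [PySem.List.pyRange_one_eq_nil]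
  | cons a t =>
      have h : ((a :: t).length : Int) - 1 = ((a :: t).length - 1 : Nat) := by
        push_cast [List.length_cons]
        omega
      rw [h, PySem.List.pyRange_zero_nat]
      rw [List.any_map]
      rfl

theorem A_eq_movP (row : List Int) : is_left_movable row = movP row := by
  induction row with
  | nil => simp [A_unfold, movP]
  | cons a t ih =>
      cases t with
      | nil => simp [A_unfold, movP]
      | cons b u =>
          rw [A_unfold]
          have hlen : (a :: b :: u).length - 1 = u.length + 1 := by simp
          rw [hlen, List.range_succ_eq_map]
          have e1 : PySem.List.pyGet? (a :: b :: u) 0 = some a := by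
            simp
          have e2 : PySem.List.pyGet? (a :: b :: u) 1 = some b := by
            simp
          have hc0 : changeA (a :: b :: u) ((0 : Nat) : Int) =
              ((a == 0 && b != 0) || (a != 0 && b == a)) := by
            simp only [Nat.cast_zero, changeA, zero_add, e1, e2, Option.getD_some]
            by_cases h1 : a = 0 <;> by_cases h3 : b = a <;> by_cases h2 : b = 0 <;> simp_all
          rw [List.any_cons, List.any_map]
          have htail := any_congr_mem (List.range u.length)
            ((fun k : Nat => changeA (a :: b :: u) (k : Int)) ∘ (· + 1))
            (fun k : Nat => changeA (b :: u) (k : Int))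
            (by
              intro k _
              simp only [Function.comp]
              have := changeA_cons a (b :: u) k
              push_cast at this ⊢
              exact this)
          rw [htail]
          rw [A_unfold] at ih
          have hlen2 : (b :: u).length - 1 = u.length := by simp
          rw [hlen2] at ih
          rw [movP, ← ih, hc0]

-- elements produced by mergeRec from a list of nonzeros are nonzero
theorem mergeRec_nonzero : ∀ l : List Int, (∀ x ∈ l, x ≠ 0) → ∀ x ∈ mergeRec l, x ≠ 0 := by
  intro l
  fun_induction mergeRec l with
  | case1 a b t hab ih =>
      intro h x hx
      rw [List.mem_cons] at hx
      rcases hx with rfl | hx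
      · have ha := h a (by simp)
        intro hc; omega
      · exact ih (fun y hy => h y (by simp [hy])) x hx
  | case2 a b t hab ih =>
      intro h x hx
      rw [List.mem_cons] at hx
      rcases hx with rfl | hx
      · exact h x (by simp)
      · exact ih (fun y hy => by rcases List.mem_cons.mp hy with rfl | hy' <;> simp_all) x hx
  | case3 l h => intro h x hx; exact h x hx

theorem mergeRec_length_le : ∀ l : List Int, (mergeRec l).length ≤ l.length := by
  intro l
  fun_induction mergeRec l with
  | case1 a b t hab ih => simp; omega
  | case2 a b t hab ih => simp at ih ⊢; omega
  | case3 l h => exact le_refl _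

theorem mergeRec_of_chain : ∀ l : List Int, l.IsChain (· ≠ ·) → mergeRec l = l := by
  intro l
  fun_induction mergeRec l with
  | case1 a b t hab ih =>
      intro hch
      exfalso
      have : a ≠ b := (List.isChain_cons_cons.mp hch).1
      simp at hab; exact this hab
  | case2 a b t hab ih =>
      intro hch
      rw [ih (List.isChain_cons_cons.mp hch).2]
  | case3 l h => intro _; rfl

theorem mergeRec_lt_of_not_chain : ∀ l : List Int, ¬ l.IsChain (· ≠ ·) → (mergeRec l).length < l.length := by
  intro l
  fun_induction mergeRec l with
  | case1 a b t hab ih =>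
      intro _
      have := mergeRec_length_le t
      simp; omega
  | case2 a b t hab ih =>
      intro hch
      have hab' : a ≠ b := by simpa using hab
      have : ¬ (b :: t).IsChain (· ≠ ·) := by
        intro hc; exact hch (List.isChain_cons_cons.mpr ⟨hab', hc⟩)
      have := ih this
      simp at this ⊢; omega
  | case3 l h =>
      intro hch
      exfalso
      apply hch
      rcases l with _ | ⟨x, _ | ⟨y, t⟩⟩
      · exact List.isChain_nil
      · exact List.isChain_singleton x
      · exact (h x y t rfl).elim

theorem chain_of_mergeRec_eq (l : List Int) (h : mergeRec l = l) : l.IsChain (· ≠ ·) := by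
  by_contra hc
  have := mergeRec_lt_of_not_chain l hc
  rw [h] at this
  omega

-- movP (0 :: l) = false forces l to be all zeros
theorem allzero_of_movP_zero : ∀ l : List Int, movP (0 :: l) = false → ∀ x ∈ l, x = 0 := by
  intro l
  induction l with
  | nil => intro _ x hx; simp at hx
  | cons b t ih =>
      intro h x hx
      rw [movP] at h
      simp only [Bool.or_eq_false_iff] at h
      obtain ⟨⟨h1, _⟩, h3⟩ := h
      have hb : b = 0 := by
        by_contra hb
        simp [hb] at h1
      subst hb
      rcases List.mem_cons.mp hx with rfl | hx'
      · rfl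
      · exact ih h3 x hx'

-- movP row = false: the row is its compaction followed by zeros
theorem S1 : ∀ row : List Int, movP row = false →
    row = row.filter (fun x => x != 0) ++ List.replicate (row.length - (row.filter (fun x => x != 0)).length) 0 := by
  intro row
  induction row with
  | nil => intro _; simp
  | cons a t ih =>
      intro h
      have htail : movP t = false := by
        cases t with
        | nil => rfl
        | cons b u => rw [movP] at h; simp only [Bool.or_eq_false_iff] at h; exact h.2
      by_cases ha : a = 0
      · subst ha
        have hz : ∀ x ∈ t, x = 0 := allzero_of_movP_zero t h
        have hf : t.filter (fun x => x != 0) = [] := by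
          rw [List.filter_eq_nil_iff]
          intro x hx
          simp [hz x hx]
        simp [hf]
        have ht : t = List.replicate t.length 0 := List.eq_replicate_of_mem hz
        calc (0 : Int) :: t = 0 :: List.replicate t.length 0 := by rw [← ht]
          _ = List.replicate (t.length + 1) 0 := by rw [List.replicate_succ]
      · have ht := ih htail
        have hfa : (a :: t).filter (fun x => x != 0) = a :: t.filter (fun x => x != 0) := by
          simp [ha]
        rw [hfa]
        have hle := List.length_filter_le (fun x => x != 0) t
        simp only [List.length_cons]
        have harith : t.length + 1 - ((t.filter (fun x => x != 0)).length + 1)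
            = t.length - (t.filter (fun x => x != 0)).length := by omega
        rw [harith, List.cons_append]
        rw [← ht]

-- movP row = false: the compaction has no adjacent equal pair
theorem S2 : ∀ row : List Int, movP row = false → (row.filter (fun x => x != 0)).IsChain (· ≠ ·) := by
  intro row
  induction row with
  | nil => intro _; exact List.isChain_nil
  | cons a t ih =>
      intro h
      have htail : movP t = false := by
        cases t with
        | nil => rfl
        | cons b u => rw [movP] at h; simp only [Bool.or_eq_false_iff] at h; exact h.2
      by_cases ha : a = 0
      · subst ha; simpa using ih htail
      · have hfa : (a :: t).filter (fun x => x != 0) = a :: t.filter (fun x => x != 0) := by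
          simp [ha]
        rw [hfa]
        cases t with
        | nil => exact List.isChain_singleton a
        | cons b u =>
            rw [movP] at h
            simp only [Bool.or_eq_false_iff] at h
            obtain ⟨⟨_, h2⟩, h3⟩ := h
            by_cases hb : b = 0
            · subst hb
              have hz : ∀ x ∈ u, x = 0 := allzero_of_movP_zero u htail
              have hf : ((0 : Int) :: u).filter (fun x => x != 0) = [] := by
                rw [List.filter_eq_nil_iff]
                intro x hx
                rcases List.mem_cons.mp hx with rfl | hx'
                · simp
                · simp [hz x hx']
              rw [hf]
              exact List.isChain_singleton a
            · have hba : b ≠ a := by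
                intro hc
                simp [ha, hc] at h2
              have hfb : (b :: u).filter (fun x => x != 0) = b :: u.filter (fun x => x != 0) := by
                simp [hb]
              have hch := ih htail
              rw [hfb] at hch ⊢
              exact List.isChain_cons_cons.mpr ⟨Ne.symm hba, hch⟩

-- a nonzero prefix with no adjacent equal pair followed by zeros is not movable
theorem T : ∀ (c : List Int) (k : Nat), (∀ x ∈ c, x ≠ 0) → c.IsChain (· ≠ ·) →
    movP (c ++ List.replicate k 0) = false := by
  intro c
  induction c with
  | nil =>
      intro k _ _
      induction k with
      | zero => rfl
      | succ m ihk =>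
          cases m with
          | zero => rfl
          | succ m' =>
              simp only [List.nil_append] at ihk ⊢
              rw [List.replicate_succ, List.replicate_succ, movP]
              have ihk' : movP ((0 : Int) :: List.replicate m' 0) = false := by
                simpa [List.replicate_succ] using ihk
              simp [ihk']
  | cons x c' ih =>
      intro k hnz hch
      have hx : x ≠ 0 := hnz x (by simp)
      cases c' with
      | nil =>
          cases k with
          | zero => rfl
          | succ m =>
              simp only [List.nil_append, List.cons_append] at *
              rw [List.replicate_succ, movP]
              have hz : movP ((0 : Int) :: List.replicate m 0) = false := by
                have := ih (m + 1) (by simp) List.isChain_nil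
                simpa [List.replicate_succ] using this
              simp [hx, hz, Ne.symm hx]
      | cons b c'' =>
          have hb : b ≠ 0 := hnz b (by simp)
          have hxb : x ≠ b := (List.isChain_cons_cons.mp hch).1
          have hrec := ih k (fun y hy => hnz y (by simp [hy])) (List.isChain_cons_cons.mp hch).2
          simp only [List.cons_append] at hrec ⊢
          rw [movP]
          simp [hx, hrec, Ne.symm hxb]

-- if the slid row equals the original, A's scan finds nothing
theorem fixed_movP_false (row : List Int)
    (h : mergeRec (row.filter (fun x => x != 0)) ++
      List.replicate (row.length - (mergeRec (row.filter (fun x => x != 0))).length) 0 = row) :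
    movP row = false := by
  set c := row.filter (fun x => x != 0) with hc
  have hcz : ∀ x ∈ c, x ≠ 0 := by
    intro x hx
    rw [hc] at hx
    simpa using (List.of_mem_filter hx)
  have hmz : ∀ x ∈ mergeRec c, x ≠ 0 := mergeRec_nonzero c hcz
  have hfilt : mergeRec c = c := by
    have hfil : (mergeRec c ++ List.replicate (row.length - (mergeRec c).length) 0).filter (fun x => x != 0)
        = mergeRec c := by
      rw [List.filter_append]
      have h1 : (mergeRec c).filter (fun x => x != 0) = mergeRec c :=
        List.filter_eq_self.mpr (fun x hx => by simpa using hmz x hx)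
      have h2 : (List.replicate (row.length - (mergeRec c).length) (0 : Int)).filter (fun x => x != 0) = [] := by
        rw [List.filter_eq_nil_iff]; intro x hx
        have := List.eq_of_mem_replicate hx
        simp [this]
      rw [h1, h2, List.append_nil]
    rw [h] at hfil
    rw [← hc] at hfil
    exact hfil.symm
  have hch : c.IsChain (· ≠ ·) := chain_of_mergeRec_eq c hfilt
  rw [hfilt] at h
  have := T c (row.length - c.length) hcz hch
  rw [h] at this
  exact this

theorem alt_eq_movP (row : List Int) : is_left_movable_alt row = movP row := by
  unfold is_left_movable_alt
  cases h : movP row with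
  | false =>
      have h1 := S1 row h
      have h2 := S2 row h
      have hm := mergeRec_of_chain _ h2
      simp only [hm]
      simp [← h1]
  | true =>
      have hne : mergeRec (row.filter (fun x => x != 0)) ++
          List.replicate (row.length - (mergeRec (row.filter (fun x => x != 0))).length) 0 ≠ row := by
        intro hc
        rw [fixed_movP_false row hc] at h
        exact Bool.false_ne_true h
      simp [hne]

-- ===== VERDICT (by name: the statement is the Claim_ definition above) =====
theorem is_left_movable_spec : Claim_equal_is_left_movable := by
  intro row _
  unfold Spec_is_left_movable
  rw [A_eq_movP, alt_eq_movP]
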